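-- pv_equiv track=rewrite | github.com/UrDeko/Python | Homework/Homework 2/biggest_difference_between_two_numbers.py | biggest_difference
-- ===== SOURCE A (Python) =====
-- def biggest_difference(numbers):
--     biggest_difference = 0
--
--     for i in range(len(numbers)):
--         for j in range(i + 1, len(numbers)):
--             difference = numbers[i] - numbers[j]
--             if abs(difference) > abs(biggest_difference):
--                 biggest_difference = difference
--
--     return biggest_difference
-- ===== SOURCE B (Python) =====
-- def biggest_difference(numbers):
--     n = len(numbers)
--     best = 0
--     if n < 2:
--         return 0
--     # suffix extremes: suf[i] = (min, max) of numbers[i:]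
--     suf = [(0, 0)] * n
--     suf[n - 1] = (numbers[n - 1], numbers[n - 1])
--     for i in range(n - 2, -1, -1):
--         lo, hi = suf[i + 1]
--         v = numbers[i]
--         suf[i] = (min(lo, v), max(hi, v))
--     for i in range(n - 1):
--         x = numbers[i]
--         lo, hi = suf[i + 1]
--         c = x - lo if abs(x - lo) >= abs(x - hi) else x - hi
--         if abs(c) > abs(best):
--             best = c
--     return best
-- ===== Notes on version B (the rewrite author's own statement) =====
-- stated objective: faster
-- what changed: A's O(n^2) all-pairs scan is replaced by an O(n) two-pass algorithm: precompute suffix (min, max) pairs, then for each position pick the suffix extreme giving the larger absolute difference; ties in that pick never decide the final value, so the result (sign and first-achieving tie-break) is identical.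
import Mathlib
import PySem

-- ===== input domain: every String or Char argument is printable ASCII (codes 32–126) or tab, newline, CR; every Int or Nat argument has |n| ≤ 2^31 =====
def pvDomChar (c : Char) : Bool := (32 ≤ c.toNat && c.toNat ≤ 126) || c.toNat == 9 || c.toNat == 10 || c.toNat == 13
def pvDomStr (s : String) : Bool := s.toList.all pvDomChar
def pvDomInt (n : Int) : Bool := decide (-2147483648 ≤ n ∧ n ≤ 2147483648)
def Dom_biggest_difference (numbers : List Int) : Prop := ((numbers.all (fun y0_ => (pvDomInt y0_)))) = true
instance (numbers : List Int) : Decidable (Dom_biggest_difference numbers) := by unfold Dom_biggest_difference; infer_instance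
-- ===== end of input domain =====

-- B replaces A's O(n^2) all-pairs scan by an O(n) pass over precomputed suffix (min, max)
-- pairs; it returns the same value (same sign and first-achieving tie-break) on every input.

-- ===== PORT A =====
def biggest_difference (numbers : List Int) : Int :=
  (PySem.List.pyRange 0 (PySem.List.len numbers) 1).foldl
    (fun b i =>
      (PySem.List.pyRange (i + 1) (PySem.List.len numbers) 1).foldl
        (fun b j =>
          let difference := PySem.List.pyGetD numbers i 0 - PySem.List.pyGetD numbers j 0
          if |difference| > |b| then difference else b)
        b)
    0

-- ===== PORT B =====
-- Source B's first loop fills suf[i] = (min, max) of numbers[i:] from suf[i+1], walking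
-- right-to-left; that descending index loop is this structural recursion from the right.
def pvSuf : List Int → List (Int × Int)
  | [] => []
  | v :: rest =>
    match pvSuf rest with
    | [] => [(v, v)]
    | (lo, hi) :: tl => (min lo v, max hi v) :: (lo, hi) :: tl

-- Source B's second loop: for i in range(n-1), pair numbers[i] with suf[i+1]; walking the
-- two lists together (suf shifted by one via drop 1) is exactly that index loop.
def pvPass : Int → List Int → List (Int × Int) → Int
  | b, x :: xs, (lo, hi) :: tl =>
    pvPass
      (let c := if |x - lo| ≥ |x - hi| then x - lo else x - hi
       if |c| > |b| then c else b) xs tl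
  | b, _, _ => b

def biggest_difference_alt (numbers : List Int) : Int :=
  pvPass 0 numbers ((pvSuf numbers).drop 1)

-- ===== PRECONDITION & SPEC =====
def Spec_biggest_difference (numbers : List Int) (out : Int) : Prop := out = biggest_difference_alt numbers
instance (numbers : List Int) (out : Int) : Decidable (Spec_biggest_difference numbers out) := by unfold Spec_biggest_difference; infer_instance

-- ===== CLAIM (what is proved, stated in full; the proofs are below) =====
def Claim_equal_biggest_difference : Prop := ∀ (numbers : List Int), Dom_biggest_difference numbers → Spec_biggest_difference numbers (biggest_difference numbers)

-- ===== LEMMAS AND PROOFS =====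

-- A's inner loop over the suffix after position i, with x = numbers[i].
def pvInner (x b : Int) (xs : List Int) : Int :=
  xs.foldl (fun b y => if |x - y| > |b| then x - y else b) b

-- A's double loop, re-expressed structurally: peel the head, run the inner loop on the tail.
def pvLoopA : Int → List Int → Int
  | b, [] => b
  | b, x :: xs => pvLoopA (pvInner x b xs) xs

-- max - min of a list (0 for short lists): the largest absolute pair difference.
def pvD : List Int → Int
  | [] => 0
  | y :: ys => ys.foldl max y - ys.foldl min y

lemma pvInner_mono (x : Int) (xs : List Int) : ∀ b : Int, |b| ≤ |pvInner x b xs| := by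
  induction xs with
  | nil => intro b; exact le_rfl
  | cons y ys ih =>
    intro b
    show |b| ≤ |pvInner x (if |x - y| > |b| then x - y else b) ys|
    refine le_trans ?_ (ih _)
    split_ifs with h
    · omega
    · exact le_rfl

lemma pvInner_keep (x : Int) (xs : List Int) : ∀ b : Int,
    (∀ z ∈ xs, |x - z| ≤ |b|) → pvInner x b xs = b := by
  induction xs with
  | nil => intro b _; rfl
  | cons y ys ih =>
    intro b h
    show pvInner x (if |x - y| > |b| then x - y else b) ys = b
    rw [if_neg (by have := h y (List.mem_cons_self) ; omega)]
    exact ih b (fun z hz => h z (List.mem_cons_of_mem _ hz))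

lemma pvInner_reaches (x : Int) (xs : List Int) (z : Int) (hz : z ∈ xs) :
    ∀ b : Int, |x - z| ≤ |pvInner x b xs| := by
  induction xs with
  | nil => cases hz
  | cons y ys ih =>
    intro b
    rcases List.mem_cons.mp hz with h | h
    · subst h
      show |x - z| ≤ |pvInner x (if |x - z| > |b| then x - z else b) ys|
      refine le_trans ?_ (pvInner_mono x ys _)
      split_ifs with h <;> omega
    · exact ih h _

lemma pvInner_le (x : Int) (xs : List Int) (M : Int) (h : ∀ z ∈ xs, |x - z| ≤ M) :
    ∀ b : Int, |b| ≤ M → |pvInner x b xs| ≤ M := by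
  induction xs with
  | nil => intro b hb; exact hb
  | cons y ys ih =>
    intro b hb
    show |pvInner x (if |x - y| > |b| then x - y else b) ys| ≤ M
    refine ih (fun z hz => h z (List.mem_cons_of_mem _ hz)) _ ?_
    have := h y (List.mem_cons_self)
    split_ifs with hcond <;> omega

lemma pvInner_shape (x : Int) (xs : List Int) : ∀ b : Int,
    pvInner x b xs = b ∨ ∃ z ∈ xs, pvInner x b xs = x - z := by
  induction xs with
  | nil => intro b; exact Or.inl rfl
  | cons y ys ih =>
    intro b
    show pvInner x (if |x - y| > |b| then x - y else b) ys = b ∨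
      ∃ z ∈ y :: ys, pvInner x (if |x - y| > |b| then x - y else b) ys = x - z
    split_ifs with h
    · rcases ih (x - y) with h' | ⟨z, hz, h'⟩
      · exact Or.inr ⟨y, List.mem_cons_self, h'⟩
      · exact Or.inr ⟨z, List.mem_cons_of_mem _ hz, h'⟩
    · rcases ih b with h' | ⟨z, hz, h'⟩
      · exact Or.inl h'
      · exact Or.inr ⟨z, List.mem_cons_of_mem _ hz, h'⟩

lemma pvFoldlMin_acc (l : List Int) : ∀ a c : Int, min (l.foldl min a) c = l.foldl min (min a c) := by
  induction l with
  | nil => intro a c; rfl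
  | cons x l ih =>
    intro a c
    show min (l.foldl min (min a x)) c = l.foldl min (min (min a c) x)
    rw [ih, min_right_comm]

lemma pvFoldlMax_acc (l : List Int) : ∀ a c : Int, max (l.foldl max a) c = l.foldl max (max a c) := by
  induction l with
  | nil => intro a c; rfl
  | cons x l ih =>
    intro a c
    show max (l.foldl max (max a x)) c = l.foldl max (max (max a c) x)
    rw [ih, max_right_comm]

lemma pvSuf_cons (ys : List Int) : ∀ y : Int,
    pvSuf (y :: ys) = (ys.foldl min y, ys.foldl max y) :: pvSuf ys := by
  induction ys with
  | nil => intro y; rfl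
  | cons z zs ih =>
    intro y
    show (match pvSuf (z :: zs) with
          | [] => [(y, y)]
          | (lo, hi) :: tl => (min lo y, max hi y) :: (lo, hi) :: tl)
        = (zs.foldl min (min y z), zs.foldl max (max y z)) :: pvSuf (z :: zs)
    rw [ih z]
    show (min (zs.foldl min z) y, max (zs.foldl max z) y) :: _ = _
    rw [pvFoldlMin_acc, pvFoldlMax_acc, min_comm z y, max_comm z y]

lemma pvD_cons (x y : Int) (ys : List Int) :
    pvD (x :: y :: ys) = max (ys.foldl max y) x - min (ys.foldl min y) x := by
  show (y :: ys).foldl max x - (y :: ys).foldl min x = _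
  show ys.foldl max (max x y) - ys.foldl min (min x y) = _
  rw [pvFoldlMax_acc, pvFoldlMin_acc, max_comm y x, min_comm y x]

lemma pvAbs_between (x z lo hi : Int) (h1 : lo ≤ z) (h2 : z ≤ hi) :
    |x - z| ≤ max |x - lo| |x - hi| := by
  rcases abs_cases (x - z) with ⟨e1, _⟩ | ⟨e1, _⟩ <;>
  rcases abs_cases (x - lo) with ⟨f1, _⟩ | ⟨f1, _⟩ <;>
  rcases abs_cases (x - hi) with ⟨g1, _⟩ | ⟨g1, _⟩ <;> omega

lemma pvD_split (x lo hi : Int) (h : lo ≤ hi) :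
    max hi x - min lo x = max (hi - lo) (max |x - lo| |x - hi|) := by
  rcases abs_cases (x - lo) with ⟨f1, _⟩ | ⟨f1, _⟩ <;>
  rcases abs_cases (x - hi) with ⟨g1, _⟩ | ⟨g1, _⟩ <;> omega

-- At a step that attains the overall extreme spread, the attained difference is forced:
-- the inner loop's winner x - z equals B's candidate c.
lemma pvUnique (x c z lo hi E : Int) (h1 : lo ≤ z) (h2 : z ≤ hi) (h3 : hi - lo ≤ E)
    (h4 : |x - z| = E)
    (hc : (|x - lo| ≥ |x - hi| ∧ c = x - lo) ∨ (¬ (|x - lo| ≥ |x - hi|) ∧ c = x - hi))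
    (hE : E = max |x - lo| |x - hi|) : x - z = c := by
  rcases abs_cases (x - z) with ⟨e1, _⟩ | ⟨e1, _⟩ <;>
  rcases abs_cases (x - lo) with ⟨f1, _⟩ | ⟨f1, _⟩ <;>
  rcases abs_cases (x - hi) with ⟨g1, _⟩ | ⟨g1, _⟩ <;> omega

-- The paired induction: run A's structural loop and B's suffix pass side by side.  States
-- always have equal absolute value; below the spread bound both keep their state, and once
-- the spread exceeds it both end on the same (forced) value.
lemma pvMain (l : List Int) : ∀ b₁ b₂ : Int, |b₁| = |b₂| →
    (pvD l ≤ |b₁| → pvLoopA b₁ l = b₁ ∧ pvPass b₂ l ((pvSuf l).drop 1) = b₂) ∧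
    (|b₁| < pvD l → pvLoopA b₁ l = pvPass b₂ l ((pvSuf l).drop 1)) := by
  induction l with
  | nil =>
    intro b₁ b₂ hb
    refine ⟨fun _ => ⟨rfl, rfl⟩, fun h => absurd h ?_⟩
    have := abs_nonneg b₁
    show ¬ |b₁| < pvD []
    simp only [pvD]; omega
  | cons x xs ih =>
    intro b₁ b₂ hb
    rcases xs with _ | ⟨y, ys⟩
    · refine ⟨fun _ => ⟨rfl, rfl⟩, fun h => absurd h ?_⟩
      have := abs_nonneg b₁
      show ¬ |b₁| < pvD [x]
      simp only [pvD, List.foldl_nil]; omega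
    · -- l = x :: y :: ys
      set lo := ys.foldl min y with hlo
      set hi := ys.foldl max y with hhi
      have hlohi : lo ≤ hi :=
        le_trans (PySem.List.foldl_min_le ys y).1 (PySem.List.le_foldl_max ys y).1
      have hmemlo : lo ∈ y :: ys := by
        rcases PySem.List.foldl_min_mem ys y with h | h
        · rw [hlo, h]; exact List.mem_cons_self
        · exact List.mem_cons_of_mem _ h
      have hmemhi : hi ∈ y :: ys := by
        rcases PySem.List.foldl_max_mem ys y with h | h
        · rw [hhi, h]; exact List.mem_cons_self
        · exact List.mem_cons_of_mem _ h
      have hboundmem : ∀ z ∈ y :: ys, lo ≤ z ∧ z ≤ hi := by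
        intro z hz
        rcases List.mem_cons.mp hz with h | h
        · subst h; exact ⟨(PySem.List.foldl_min_le ys z).1, (PySem.List.le_foldl_max ys z).1⟩
        · exact ⟨(PySem.List.foldl_min_le ys y).2 z h, (PySem.List.le_foldl_max ys y).2 z h⟩
      set c := if |x - lo| ≥ |x - hi| then x - lo else x - hi with hc
      set E := max |x - lo| |x - hi| with hE
      have hcE : |c| = E := by
        rw [hc, hE]; split_ifs with h <;> omega
      have hcc : (|x - lo| ≥ |x - hi| ∧ c = x - lo) ∨ (¬ (|x - lo| ≥ |x - hi|) ∧ c = x - hi) := by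
        rw [hc]; split_ifs with h
        exacts [Or.inl ⟨h, rfl⟩, Or.inr ⟨h, rfl⟩]
      have hA : pvLoopA b₁ (x :: y :: ys) = pvLoopA (pvInner x b₁ (y :: ys)) (y :: ys) := rfl
      have hsufdrop : (pvSuf (y :: ys)).drop 1 = pvSuf ys := by rw [pvSuf_cons]; rfl
      have hB : pvPass b₂ (x :: y :: ys) ((pvSuf (x :: y :: ys)).drop 1)
          = pvPass (if |c| > |b₂| then c else b₂) (y :: ys) ((pvSuf (y :: ys)).drop 1) := by
        rw [pvSuf_cons (y :: ys) x]
        show pvPass b₂ (x :: y :: ys) (pvSuf (y :: ys)) = _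
        rw [pvSuf_cons ys y]
        rfl
      have hD : pvD (x :: y :: ys) = max hi x - min lo x := pvD_cons x y ys
      have hDxs : pvD (y :: ys) = hi - lo := rfl
      have hsplit : max hi x - min lo x = max (hi - lo) E := pvD_split x lo hi hlohi
      by_cases hEb : E ≤ |b₁|
      · -- neither loop updates its state at this step
        have he₁ : pvInner x b₁ (y :: ys) = b₁ :=
          pvInner_keep x (y :: ys) b₁ (fun z hz => by
            have h' := hboundmem z hz
            have := pvAbs_between x z lo hi h'.1 h'.2
            omega)
        have he₂ : (if |c| > |b₂| then c else b₂) = b₂ := if_neg (by omega)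
        constructor
        · intro hDl
          have hDxs' : pvD (y :: ys) ≤ |b₁| := by rw [hDxs]; rw [hD, hsplit] at hDl; omega
          obtain ⟨r1, r2⟩ := (ih b₁ b₂ hb).1 hDxs'
          exact ⟨by rw [hA, he₁, r1], by rw [hB, he₂, r2]⟩
        · intro hDl
          have h' : |b₁| < pvD (y :: ys) := by rw [hDxs]; rw [hD, hsplit] at hDl; omega
          rw [hA, hB, he₁, he₂]
          exact (ih b₁ b₂ hb).2 h'
      · -- both loops update; the new states have absolute value E
        rw [not_le] at hEb
        have he₂ : (if |c| > |b₂| then c else b₂) = c := if_pos (by omega)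
        set e₁ := pvInner x b₁ (y :: ys) with he₁def
        have h1 : |x - lo| ≤ |e₁| := pvInner_reaches x (y :: ys) lo hmemlo b₁
        have h2 : |x - hi| ≤ |e₁| := pvInner_reaches x (y :: ys) hi hmemhi b₁
        have hup : |e₁| ≤ E :=
          pvInner_le x (y :: ys) E (fun z hz => by
            have h' := hboundmem z hz
            have := pvAbs_between x z lo hi h'.1 h'.2
            omega) b₁ (by omega)
        have habs : |e₁| = E := by omega
        have hshape : ∃ z ∈ y :: ys, e₁ = x - z := by
          rcases pvInner_shape x (y :: ys) b₁ with h | h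
          · exfalso; rw [he₁def, h] at habs; omega
          · exact h
        obtain ⟨z, hz, hez⟩ := hshape
        constructor
        · intro hDl
          exfalso; rw [hD, hsplit] at hDl; omega
        · intro _
          rw [hA, hB, he₂]
          have hbe : |e₁| = |c| := by omega
          by_cases hD2 : pvD (y :: ys) ≤ |e₁|
          · obtain ⟨r1, r2⟩ := (ih e₁ c hbe).1 hD2
            rw [r1, r2, hez]
            have hzb := hboundmem z hz
            have h3 : hi - lo ≤ E := by rw [hDxs] at hD2; omega
            exact pvUnique x c z lo hi E hzb.1 hzb.2 h3 (by rw [← hez]; exact habs) hcc hE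
          · rw [not_le] at hD2
            exact (ih e₁ c hbe).2 hD2

-- Bridge: A's index-based double loop over pyRange equals the structural pvLoopA.
lemma pvBridgeA_aux (l : List Int) : ∀ (n k : Nat) (b : Int), l.length - k ≤ n →
    (PySem.List.pyRange (k : Int) (PySem.List.len l) 1).foldl
      (fun b i =>
        (PySem.List.pyRange (i + 1) (PySem.List.len l) 1).foldl
          (fun b j =>
            let difference := PySem.List.pyGetD l i 0 - PySem.List.pyGetD l j 0
            if |difference| > |b| then difference else b)
          b)
      b
    = pvLoopA b (l.drop k) := by
  intro n
  induction n with
  | zero =>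
    intro k b h
    have hk : l.length ≤ k := by omega
    rw [PySem.List.pyRange_one_eq_nil (by simp [PySem.List.len_eq]; exact_mod_cast hk)]
    rw [List.drop_of_length_le hk]
    rfl
  | succ n ihn =>
    intro k b h
    by_cases hk : l.length ≤ k
    · rw [PySem.List.pyRange_one_eq_nil (by simp [PySem.List.len_eq]; exact_mod_cast hk)]
      rw [List.drop_of_length_le hk]
      rfl
    · rw [not_le] at hk
      rw [PySem.List.pyRange_one_cons (by simp [PySem.List.len_eq]; exact_mod_cast hk)]
      rw [List.foldl_cons]
      have hcast : (k : Int) + 1 = ((k + 1 : Nat) : Int) := by push_cast; ring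
      rw [hcast, ihn (k + 1) _ (by omega)]
      have hinner :
          (PySem.List.pyRange ((k + 1 : Nat) : Int) (PySem.List.len l) 1).foldl
            (fun b j =>
              let difference := PySem.List.pyGetD l (k : Int) 0 - PySem.List.pyGetD l j 0
              if |difference| > |b| then difference else b)
            b
          = pvInner (l[k]'hk) b (l.drop (k + 1)) := by
        rw [PySem.List.foldl_pyRange_pyGetD (xs := l) (d := 0)
              (f := fun b y =>
                if |PySem.List.pyGetD l (k : Int) 0 - y| > |b|
                then PySem.List.pyGetD l (k : Int) 0 - y else b)
              (init := b) (by positivity)]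
        rw [Int.toNat_natCast, PySem.List.pyGetD_ofNat l k 0 hk]
        rfl
      rw [hinner, List.drop_eq_getElem_cons hk]
      rfl

lemma pvBridgeA (l : List Int) : biggest_difference l = pvLoopA 0 l := by
  have h := pvBridgeA_aux l l.length 0 0 (by omega)
  simp only [Nat.cast_zero, List.drop_zero] at h
  exact h

-- ===== VERDICT (by name: the statement is the Claim_ definition above) =====
theorem biggest_difference_spec : Claim_equal_biggest_difference := by
  unfold Claim_equal_biggest_difference
  intro numbers _
  unfold Spec_biggest_difference biggest_difference_alt
  rw [pvBridgeA]
  by_cases h : pvD numbers ≤ |(0 : Int)|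
  · obtain ⟨r1, r2⟩ := (pvMain numbers 0 0 rfl).1 h
    rw [r1, r2]
  · rw [not_le] at h
    exact (pvMain numbers 0 0 rfl).2 h
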